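-- pv_equiv track=rewrite | github.com/banpojihyo/baekho-phishing-analyzer | app/analyzers/explainable_report.py | _component_labels
-- ===== SOURCE A (Python) =====
-- def _unique(items: list[str]) -> list[str]:
--     return list(dict.fromkeys(item for item in items if item))
--
-- def _component_labels(evidence: list[str]) -> list[str]:
--     labels: list[str] = []
--     for item in evidence:
--         if item.startswith("[Header]"):
--             labels.append("헤더")
--         elif item.startswith("[Body]"):
--             labels.append("본문/HTML")
--         elif item.startswith("[URL]"):
--             labels.append("URL")
--         elif item.startswith("[Attachment]"):
--             labels.append("첨부파일")
--     return _unique(labels)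
-- ===== SOURCE B (Python) =====
-- _PREFIX_LABELS = (
--     ("[Header]", "\ud5e4\ub354"),
--     ("[Body]", "\ubcf8\ubb38/HTML"),
--     ("[URL]", "URL"),
--     ("[Attachment]", "\ucca8\ubd80\ud30c\uc77c"),
-- )
--
-- def _component_labels(evidence: list[str]) -> list[str]:
--     # For each component, find the position of its first piece of evidence;
--     # then emit the labels of the matched components ordered by that position.
--     # No dedup pass is needed: there is one candidate entry per component.
--     firsts = []
--     for prefix, label in _PREFIX_LABELS:
--         for i, item in enumerate(evidence):
--             if item.startswith(prefix):
--                 firsts.append((i, label))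
--                 break
--     firsts.sort(key=lambda t: t[0])
--     return [label for _, label in firsts]
-- ===== Notes on version B (the rewrite author's own statement) =====
-- stated objective: alternative
-- what changed: Instead of A's item-major pass (classify every item via an if/elif chain into a labels list, then dedup with dict.fromkeys), B is component-major: for each of the four components it scans evidence once for the index of its first matching item, then sorts the matched (index,label) pairs by index and emits the labels, needing no dedup at all.
import Mathlib
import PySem

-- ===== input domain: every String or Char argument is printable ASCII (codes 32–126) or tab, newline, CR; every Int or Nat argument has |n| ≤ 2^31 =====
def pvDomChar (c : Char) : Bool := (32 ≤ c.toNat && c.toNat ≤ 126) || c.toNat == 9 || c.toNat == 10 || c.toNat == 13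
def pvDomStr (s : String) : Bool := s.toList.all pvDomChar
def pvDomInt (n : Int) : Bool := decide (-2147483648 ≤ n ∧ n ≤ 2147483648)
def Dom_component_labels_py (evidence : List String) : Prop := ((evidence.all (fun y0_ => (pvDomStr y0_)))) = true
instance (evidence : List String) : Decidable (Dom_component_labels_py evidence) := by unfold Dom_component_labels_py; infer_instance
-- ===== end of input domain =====

-- B replaces A's item-major classify-then-dedup pipeline by a component-major scan: one
-- first-match-index search per component, then a sort of the matched (index,label) pairs;
-- alternative decomposition, same cost.

-- ===== PORT A =====
-- _unique: list(dict.fromkeys(item for item in items if item))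
def pvUnique (items : List String) : List String :=
  PySem.List.dedup (items.filter (fun item => item ≠ ""))

def component_labels_py (evidence : List String) : List String :=
  pvUnique (evidence.foldl (fun labels item =>
    if PySem.Str.startswith item "[Header]" then labels ++ ["헤더"]
    else if PySem.Str.startswith item "[Body]" then labels ++ ["본문/HTML"]
    else if PySem.Str.startswith item "[URL]" then labels ++ ["URL"]
    else if PySem.Str.startswith item "[Attachment]" then labels ++ ["첨부파일"]
    else labels) [])

-- ===== PORT B =====
def pvPairs : List (String × String) :=
  [("[Header]", "헤더"), ("[Body]", "본문/HTML"), ("[URL]", "URL"), ("[Attachment]", "첨부파일")]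

-- inner 'for i, item in enumerate(evidence): if item.startswith(prefix): … break' search
def pvFirstIdx (pre : String) : List String → Int → Option Int
  | [], _ => none
  | x :: xs, i => if PySem.Str.startswith x pre then some i else pvFirstIdx pre xs (i + 1)

-- outer loop building 'firsts'
def pvFirsts (evidence : List String) : List (Int × String) :=
  pvPairs.foldl (fun acc pl =>
    match pvFirstIdx pl.1 evidence 0 with
    | some i => acc ++ [(i, pl.2)]
    | none => acc) []

def component_labels_py_alt (evidence : List String) : List String :=
  (PySem.List.sorted (pvFirsts evidence) (fun t => t.1)).map (fun t => t.2)

-- ===== PRECONDITION & SPEC =====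
def Spec_component_labels_py (evidence : List String) (out : List String) : Prop := out = component_labels_py_alt evidence
instance (evidence : List String) (out : List String) : Decidable (Spec_component_labels_py evidence out) := by unfold Spec_component_labels_py; infer_instance

-- ===== CLAIM =====
def Claim_equal_component_labels_py : Prop := ∀ (evidence : List String), Dom_component_labels_py evidence → Spec_component_labels_py evidence (component_labels_py evidence)

-- ===== LEMMAS AND PROOFS =====

-- proof-side classifier: the value A's if/elif chain appends for one item
def pvClassify (item : String) : Option String :=
  if PySem.Str.startswith item "[Header]" then some "헤더"
  else if PySem.Str.startswith item "[Body]" then some "본문/HTML"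
  else if PySem.Str.startswith item "[URL]" then some "URL"
  else if PySem.Str.startswith item "[Attachment]" then some "첨부파일"
  else none

-- proof-side canonical result: first-occurrence (index,label) pairs in evidence order
def pvD : List String → Int → List (Int × String)
  | [], _ => []
  | x :: xs, i =>
      match pvClassify x with
      | none => pvD xs (i + 1)
      | some lab => (i, lab) :: (pvD xs (i + 1)).filter (fun t => t.2 != lab)

-- A's label-collecting loop is the filterMap of the classifier
lemma labelsA_eq (evidence : List String) (acc : List String) :
    evidence.foldl (fun labels item =>
      if PySem.Str.startswith item "[Header]" then labels ++ ["헤더"]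
      else if PySem.Str.startswith item "[Body]" then labels ++ ["본문/HTML"]
      else if PySem.Str.startswith item "[URL]" then labels ++ ["URL"]
      else if PySem.Str.startswith item "[Attachment]" then labels ++ ["첨부파일"]
      else labels) acc
    = acc ++ evidence.filterMap pvClassify := by
  induction evidence generalizing acc with
  | nil => simp
  | cons x xs ih =>
      rw [List.foldl_cons, List.filterMap_cons,
        show pvClassify x =
          (if PySem.Str.startswith x "[Header]" then some "헤더"
           else if PySem.Str.startswith x "[Body]" then some "본문/HTML"
           else if PySem.Str.startswith x "[URL]" then some "URL"
           else if PySem.Str.startswith x "[Attachment]" then some "첨부파일"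
           else none) from rfl]
      split_ifs <;> rw [ih] <;> simp

-- every produced label is nonempty
lemma classify_ne_empty {item lab : String} (h : pvClassify item = some lab) :
    ¬ lab = "" := by
  unfold pvClassify at h
  split_ifs at h <;> simp only [Option.some.injEq] at h <;> rw [← h] <;> decide

-- the truthiness filter in _unique keeps everything
lemma filter_labels (evidence : List String) :
    (evidence.filterMap pvClassify).filter (fun item => item ≠ "") =
      evidence.filterMap pvClassify := by
  apply List.filter_eq_self.2
  intro a ha
  obtain ⟨item, _, h⟩ := List.mem_filterMap.1 ha
  simpa using classify_ne_empty h

-- two bracketed prefixes differing in their second character cannot both prefix one string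
lemma prefix_char1 {a b : Char} {p q s : List Char}
    (h1 : (('[' :: a :: p)).isPrefixOf s = true)
    (h2 : (('[' :: b :: q)).isPrefixOf s = true) : a = b := by
  rw [List.isPrefixOf_iff_prefix] at h1 h2
  obtain ⟨t1, e1⟩ := h1
  obtain ⟨t2, e2⟩ := h2
  have h := e1.trans e2.symm
  simp at h
  exact h.1

lemma swC_excl {x : String} {a b : Char} (p q : List Char)
    (ha : PySem.Chars.startswith x.toList ('[' :: a :: p) = true) (hne : a ≠ b) :
    PySem.Chars.startswith x.toList ('[' :: b :: q) = false := by
  by_contra h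
  rw [Bool.not_eq_false] at h
  exact hne (prefix_char1 ha h)

-- a matching prefix from the table determines the classifier's answer
lemma sw_classify (x p lab : String) (hp : (p, lab) ∈ pvPairs)
    (hsw : PySem.Str.startswith x p = true) : pvClassify x = some lab := by
  simp only [pvPairs, List.mem_cons, List.not_mem_nil, or_false, Prod.mk.injEq] at hp
  rcases hp with ⟨rfl, rfl⟩ | ⟨rfl, rfl⟩ | ⟨rfl, rfl⟩ | ⟨rfl, rfl⟩
  · have hH : PySem.Chars.startswith x.toList ('[' :: 'H' :: ['e','a','d','e','r',']']) = true := hsw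
    simp [pvClassify, hH]
  · have hB : PySem.Chars.startswith x.toList ('[' :: 'B' :: ['o','d','y',']']) = true := hsw
    have hH : PySem.Chars.startswith x.toList ('[' :: 'H' :: ['e','a','d','e','r',']']) = false :=
      swC_excl _ _ hB (by decide)
    simp [pvClassify, hB, hH]
  · have hU : PySem.Chars.startswith x.toList ('[' :: 'U' :: ['R','L',']']) = true := hsw
    have hH : PySem.Chars.startswith x.toList ('[' :: 'H' :: ['e','a','d','e','r',']']) = false :=
      swC_excl _ _ hU (by decide)
    have hB : PySem.Chars.startswith x.toList ('[' :: 'B' :: ['o','d','y',']']) = false :=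
      swC_excl _ _ hU (by decide)
    simp [pvClassify, hU, hH, hB]
  · have hA : PySem.Chars.startswith x.toList
        ('[' :: 'A' :: ['t','t','a','c','h','m','e','n','t',']']) = true := hsw
    have hH : PySem.Chars.startswith x.toList ('[' :: 'H' :: ['e','a','d','e','r',']']) = false :=
      swC_excl _ _ hA (by decide)
    have hB : PySem.Chars.startswith x.toList ('[' :: 'B' :: ['o','d','y',']']) = false :=
      swC_excl _ _ hA (by decide)
    have hU : PySem.Chars.startswith x.toList ('[' :: 'U' :: ['R','L',']']) = false :=
      swC_excl _ _ hA (by decide)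
    simp [pvClassify, hA, hH, hB, hU]

lemma classify_none {x : String} (h : pvClassify x = none) :
    ∀ pl ∈ pvPairs, PySem.Str.startswith x pl.1 = false := by
  intro pl hpl
  unfold pvClassify at h
  split_ifs at h with h1 h2 h3 h4
  simp only [Bool.not_eq_true] at h1 h2 h3 h4
  simp only [pvPairs, List.mem_cons, List.not_mem_nil, or_false] at hpl
  rcases hpl with rfl | rfl | rfl | rfl
  · exact h1
  · exact h2
  · exact h3
  · exact h4

lemma classify_some_inv {x lab : String} (h : pvClassify x = some lab) :
    ∃ p, (p, lab) ∈ pvPairs ∧ PySem.Str.startswith x p = true := by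
  unfold pvClassify at h
  split_ifs at h with h1 h2 h3 h4
  · injection h with h; exact ⟨"[Header]", by rw [← h]; simp [pvPairs], h1⟩
  · injection h with h; exact ⟨"[Body]", by rw [← h]; simp [pvPairs], h2⟩
  · injection h with h; exact ⟨"[URL]", by rw [← h]; simp [pvPairs], h3⟩
  · injection h with h; exact ⟨"[Attachment]", by rw [← h]; simp [pvPairs], h4⟩

lemma pairs_label_inj (p q l : String) (hp : (p, l) ∈ pvPairs) (hq : (q, l) ∈ pvPairs) :
    p = q := by
  simp only [pvPairs, List.mem_cons, List.not_mem_nil, or_false, Prod.mk.injEq] at hp hq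
  rcases hp with ⟨rfl, rfl⟩ | ⟨rfl, rfl⟩ | ⟨rfl, rfl⟩ | ⟨rfl, rfl⟩ <;> simp_all

-- membership characterization of the canonical list
lemma mem_pvD : ∀ (l : List String) (i : Int) (t : Int × String),
    t ∈ pvD l i ↔ ∃ p, (p, t.2) ∈ pvPairs ∧ pvFirstIdx p l i = some t.1 := by
  intro l
  induction l with
  | nil => intro i t; simp [pvD, pvFirstIdx]
  | cons x xs ih =>
    intro i t
    cases hc : pvClassify x with
    | none =>
      have hsw := classify_none hc
      simp only [pvD, hc]
      rw [ih (i + 1) t]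
      constructor
      · rintro ⟨p, hp, hf⟩
        have hswC : PySem.Chars.startswith x.toList p.toList = false := hsw (p, t.2) hp
        exact ⟨p, hp, by simp [pvFirstIdx, hswC, hf]⟩
      · rintro ⟨p, hp, hf⟩
        have hswC : PySem.Chars.startswith x.toList p.toList = false := hsw (p, t.2) hp
        exact ⟨p, hp, by simpa [pvFirstIdx, hswC] using hf⟩
    | some lab =>
      obtain ⟨p₀, hp₀, hsw₀⟩ := classify_some_inv hc
      have hsw₀C : PySem.Chars.startswith x.toList p₀.toList = true := hsw₀
      simp only [pvD, hc, List.mem_cons, List.mem_filter]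
      constructor
      · rintro (rfl | ⟨hmem, hne⟩)
        · exact ⟨p₀, hp₀, by simp [pvFirstIdx, hsw₀C]⟩
        · obtain ⟨p, hp, hf⟩ := (ih (i + 1) t).1 hmem
          have hswp : PySem.Chars.startswith x.toList p.toList = false := by
            cases hq : PySem.Chars.startswith x.toList p.toList
            · rfl
            · exfalso
              have hcl := sw_classify x p t.2 hp hq
              rw [hc] at hcl
              injection hcl with hcl
              rw [← hcl] at hne
              simp at hne
          exact ⟨p, hp, by simp [pvFirstIdx, hswp, hf]⟩
      · rintro ⟨p, hp, hf⟩
        cases hq : PySem.Chars.startswith x.toList p.toList with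
        | true =>
          have hcl := sw_classify x p t.2 hp hq
          rw [hc] at hcl
          injection hcl with hcl
          have ht1 : some i = some t.1 := by simpa [pvFirstIdx, hq] using hf
          injection ht1 with ht1
          left
          obtain ⟨t1, t2⟩ := t
          simp only [Prod.mk.injEq]
          exact ⟨ht1.symm, hcl.symm⟩
        | false =>
          have hf' : pvFirstIdx p xs (i + 1) = some t.1 := by
            simpa [pvFirstIdx, hq] using hf
          refine Or.inr ⟨(ih (i + 1) t).2 ⟨p, hp, hf'⟩, ?_⟩
          simp only [bne_iff_ne, ne_eq]
          intro he
          have hpp : p = p₀ := pairs_label_inj p p₀ t.2 hp (by rw [he]; exact hp₀)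
          rw [hpp, hsw₀C] at hq
          simp at hq

lemma pvD_fst_le : ∀ (l : List String) (i : Int) (t : Int × String), t ∈ pvD l i → i ≤ t.1 := by
  intro l
  induction l with
  | nil => intro i t h; simp [pvD] at h
  | cons x xs ih =>
    intro i t h
    cases hc : pvClassify x with
    | none =>
      rw [pvD, hc] at h
      have := ih (i + 1) t h
      omega
    | some lab =>
      rw [pvD, hc] at h
      rcases List.mem_cons.1 h with rfl | h
      · simp
      · have := ih (i + 1) t (List.mem_filter.1 h).1
        omega

lemma pvD_pairwise : ∀ (l : List String) (i : Int),
    (pvD l i).Pairwise (fun a b => a.1 < b.1) := by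
  intro l
  induction l with
  | nil => intro i; simp [pvD]
  | cons x xs ih =>
    intro i
    cases hc : pvClassify x with
    | none => rw [pvD, hc]; exact ih (i + 1)
    | some lab =>
      rw [pvD, hc]
      refine List.Pairwise.cons ?_ (List.Pairwise.sublist List.filter_sublist (ih (i + 1)))
      intro t ht
      have := pvD_fst_le xs (i + 1) t (List.mem_filter.1 ht).1
      omega

lemma pvD_nodup (l : List String) (i : Int) : (pvD l i).Nodup := by
  have h := pvD_pairwise l i
  exact h.imp (fun {a b} hlt => by intro he; rw [he] at hlt; exact lt_irrefl _ hlt)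

-- B's 'firsts' loop as a filterMap over the table
lemma pvFirsts_foldl (evidence : List String) :
    ∀ (ps : List (String × String)) (acc : List (Int × String)),
    ps.foldl (fun acc pl =>
      match pvFirstIdx pl.1 evidence 0 with
      | some i => acc ++ [(i, pl.2)]
      | none => acc) acc
    = acc ++ ps.filterMap (fun pl => (pvFirstIdx pl.1 evidence 0).map (fun i => (i, pl.2))) := by
  intro ps
  induction ps with
  | nil => intro acc; simp
  | cons pl ps ih =>
    intro acc
    rw [List.foldl_cons, List.filterMap_cons]
    cases h : pvFirstIdx pl.1 evidence 0 <;> simp_all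

lemma pvFirsts_filterMap (evidence : List String) :
    pvFirsts evidence
      = pvPairs.filterMap (fun pl => (pvFirstIdx pl.1 evidence 0).map (fun i => (i, pl.2))) := by
  rw [pvFirsts, pvFirsts_foldl, List.nil_append]

lemma mem_pvFirsts (evidence : List String) (t : Int × String) :
    t ∈ pvFirsts evidence ↔ ∃ p, (p, t.2) ∈ pvPairs ∧ pvFirstIdx p evidence 0 = some t.1 := by
  rw [pvFirsts_filterMap, List.mem_filterMap]
  constructor
  · rintro ⟨⟨p, lab⟩, hp, hg⟩
    rw [Option.map_eq_some_iff] at hg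
    obtain ⟨j, hj, ht⟩ := hg
    refine ⟨p, ?_, ?_⟩
    · rw [← ht]; exact hp
    · rw [← ht]; exact hj
  · rintro ⟨p, hp, hf⟩
    exact ⟨(p, t.2), hp, by rw [hf]; rfl⟩

lemma firsts_snd_sublist (evidence : List String) :
    ∀ ps : List (String × String),
      ((ps.filterMap (fun pl => (pvFirstIdx pl.1 evidence 0).map (fun i => (i, pl.2)))).map
        Prod.snd).Sublist (ps.map Prod.snd) := by
  intro ps
  induction ps with
  | nil => simp
  | cons pl ps ih =>
    rw [List.filterMap_cons]
    cases h : pvFirstIdx pl.1 evidence 0 with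
    | none => exact ih.cons pl.2
    | some i => simpa using ih.cons₂ pl.2

lemma pvFirsts_nodup (evidence : List String) : (pvFirsts evidence).Nodup := by
  have hsub := firsts_snd_sublist evidence pvPairs
  have hmap : ((pvFirsts evidence).map Prod.snd).Nodup := by
    rw [pvFirsts_filterMap]
    exact hsub.nodup (by decide)
  exact hmap.of_map

lemma sorted_firsts_eq (evidence : List String) :
    PySem.List.sorted (pvFirsts evidence) (fun t => t.1) = pvD evidence 0 := by
  apply PySem.List.sorted_eq_of_perm_of_pairwise_lt
  · rw [List.perm_ext_iff_of_nodup (pvD_nodup evidence 0) (pvFirsts_nodup evidence)]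
    intro t
    rw [mem_pvD, mem_pvFirsts]
  · exact pvD_pairwise evidence 0

-- the canonical list's labels are A's deduplicated labels
lemma snd_pvD : ∀ (l : List String) (i : Int),
    (pvD l i).map Prod.snd = PySem.List.dedup (l.filterMap pvClassify) := by
  intro l
  induction l with
  | nil => intro i; simp [pvD, PySem.List.dedup]
  | cons x xs ih =>
    intro i
    rw [List.filterMap_cons]
    cases hc : pvClassify x with
    | none => rw [pvD, hc]; exact ih (i + 1)
    | some lab =>
      rw [pvD, hc, List.map_cons, PySem.List.dedup_eq_ofList, PySem.Set.ofList_cons,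
        PySem.Set.discard]
      congr 1
      rw [show (fun (t : Int × String) => t.2 != lab) = ((fun y => y != lab) ∘ Prod.snd)
          from rfl,
        ← List.filter_map, ih (i + 1), PySem.List.dedup_eq_ofList]
      rfl

-- ===== VERDICT =====
theorem component_labels_py_spec : Claim_equal_component_labels_py := by
  intro evidence _
  unfold Spec_component_labels_py component_labels_py component_labels_py_alt pvUnique
  rw [labelsA_eq evidence [], List.nil_append, filter_labels, sorted_firsts_eq, snd_pvD]
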